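-- pv_equiv track=rewrite | github.com/mj064/AI_Network_troubleshoot | src/backend/utils/utils.py | _categorize_alerts
-- ===== SOURCE A (Python) =====
-- from typing import Dict, List, Tuple
--
-- def _categorize_alerts(alerts: List[str]) -> Dict[str, List]:
--     """Categorize alerts by type"""
--     categories = {
--         "performance": [],
--         "availability": [],
--         "connectivity": [],
--         "configuration": []
--     }
--
--     for alert in alerts:
--         if "CPU" in alert or "MEMORY" in alert or "TEMPERATURE" in alert:
--             categories["performance"].append(alert)
--         elif "DOWN" in alert or "UNREACHABLE" in alert:
--             categories["availability"].append(alert)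
--         elif "BGP" in alert or "OSPF" in alert or "ROUTE" in alert:
--             categories["connectivity"].append(alert)
--         else:
--             categories["configuration"].append(alert)
--
--     return {k: v for k, v in categories.items() if v}
-- ===== SOURCE B (Python) =====
-- from typing import Dict, List, Tuple
--
-- _RULES = [
--     ("performance", ("CPU", "MEMORY", "TEMPERATURE")),
--     ("availability", ("DOWN", "UNREACHABLE")),
--     ("connectivity", ("BGP", "OSPF", "ROUTE")),
-- ]
--
--
-- def _classify(alert: str) -> str:
--     for name, keywords in _RULES:
--         if any(kw in alert for kw in keywords):
--             return name
--     return "configuration"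
--
--
-- def _categorize_alerts(alerts: List[str]) -> Dict[str, List]:
--     """Categorize alerts by type"""
--     result = {}
--     for cat in [name for name, _ in _RULES] + ["configuration"]:
--         matched = [a for a in alerts if _classify(a) == cat]
--         if matched:
--             result[cat] = matched
--     return result
-- ===== Notes on version B (the rewrite author's own statement) =====
-- stated objective: simpler
-- what changed: Replaces A's single-pass if/elif dispatch into a pre-built mutable four-list dict by a data-driven rules table with a _classify() helper and one filter pass per category, building only the non-empty entries directly.
import Mathlib
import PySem

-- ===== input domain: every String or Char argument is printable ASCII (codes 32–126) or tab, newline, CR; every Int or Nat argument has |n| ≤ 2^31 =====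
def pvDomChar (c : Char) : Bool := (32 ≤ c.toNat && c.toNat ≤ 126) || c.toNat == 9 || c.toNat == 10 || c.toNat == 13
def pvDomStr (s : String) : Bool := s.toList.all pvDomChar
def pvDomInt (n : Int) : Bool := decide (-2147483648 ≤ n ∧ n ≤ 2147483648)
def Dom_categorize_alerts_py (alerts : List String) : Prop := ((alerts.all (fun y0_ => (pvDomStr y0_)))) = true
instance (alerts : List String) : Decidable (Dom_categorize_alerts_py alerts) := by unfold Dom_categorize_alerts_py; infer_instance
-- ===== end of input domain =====

-- B replaces A's per-alert if/elif dispatch into a mutated four-list dict by a data-driven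
-- rules table with a classify() helper and one filter pass per category (objective: simpler).

-- ===== PORT A =====
def categorize_alerts_py (alerts : List String) : List (String × List String) :=
  let categories : PySem.Dict String (List String) :=
    PySem.Dict.mk [("performance", []), ("availability", []), ("connectivity", []), ("configuration", [])]
  let categories := alerts.foldl (fun d alert =>
    if PySem.Str.isIn "CPU" alert || PySem.Str.isIn "MEMORY" alert || PySem.Str.isIn "TEMPERATURE" alert then
      d.modify "performance" [] (· ++ [alert])
    else if PySem.Str.isIn "DOWN" alert || PySem.Str.isIn "UNREACHABLE" alert then
      d.modify "availability" [] (· ++ [alert])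
    else if PySem.Str.isIn "BGP" alert || PySem.Str.isIn "OSPF" alert || PySem.Str.isIn "ROUTE" alert then
      d.modify "connectivity" [] (· ++ [alert])
    else
      d.modify "configuration" [] (· ++ [alert])) categories
  categories.items.filter (fun kv => !kv.2.isEmpty)

-- ===== PORT B =====
def pvRules : List (String × List String) :=
  [("performance", ["CPU", "MEMORY", "TEMPERATURE"]),
   ("availability", ["DOWN", "UNREACHABLE"]),
   ("connectivity", ["BGP", "OSPF", "ROUTE"])]

def pvClassify (alert : String) : String :=
  match pvRules.find? (fun r => r.2.any (fun kw => PySem.Str.isIn kw alert)) with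
  | some r => r.1
  | none => "configuration"

def categorize_alerts_py_alt (alerts : List String) : List (String × List String) :=
  (pvRules.map (·.1) ++ ["configuration"]).foldl (fun result cat =>
    let matched := alerts.filter (fun a => pvClassify a == cat)
    if matched.isEmpty then result else result ++ [(cat, matched)]) []

-- ===== PRECONDITION & SPEC =====
def Spec_categorize_alerts_py (alerts : List String) (out : List (String × List String)) : Prop := out = categorize_alerts_py_alt alerts
instance (alerts : List String) (out : List (String × List String)) : Decidable (Spec_categorize_alerts_py alerts out) := by unfold Spec_categorize_alerts_py; infer_instance

-- ===== CLAIM (what is proved, stated in full; the proofs are below) =====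
def Claim_equal_categorize_alerts_py : Prop := ∀ (alerts : List String), Dom_categorize_alerts_py alerts → Spec_categorize_alerts_py alerts (categorize_alerts_py alerts)

-- ===== LEMMAS AND PROOFS =====

-- The three boolean conditions of A's if/elif chain.
def pvC1 (a : String) : Bool := PySem.Str.isIn "CPU" a || PySem.Str.isIn "MEMORY" a || PySem.Str.isIn "TEMPERATURE" a
def pvC2 (a : String) : Bool := PySem.Str.isIn "DOWN" a || PySem.Str.isIn "UNREACHABLE" a
def pvC3 (a : String) : Bool := PySem.Str.isIn "BGP" a || PySem.Str.isIn "OSPF" a || PySem.Str.isIn "ROUTE" a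

lemma pvClassify_eq (a : String) :
    pvClassify a = if pvC1 a then "performance" else if pvC2 a then "availability"
      else if pvC3 a then "connectivity" else "configuration" := by
  have e1 : (["CPU", "MEMORY", "TEMPERATURE"].any (fun kw => PySem.Str.isIn kw a)) = pvC1 a := by
    simp [pvC1, Bool.or_assoc]
  have e2 : (["DOWN", "UNREACHABLE"].any (fun kw => PySem.Str.isIn kw a)) = pvC2 a := by
    simp [pvC2]
  have e3 : (["BGP", "OSPF", "ROUTE"].any (fun kw => PySem.Str.isIn kw a)) = pvC3 a := by
    simp [pvC3, Bool.or_assoc]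
  simp only [pvClassify, pvRules, List.find?, e1, e2, e3]
  cases h1 : pvC1 a <;> cases h2 : pvC2 a <;> cases h3 : pvC3 a <;> simp [h1, h2, h3]

-- modify on the literal four-key dict, one lemma per key.
lemma pvModifyP (l1 l2 l3 l4 : List String) (a : String) :
    (PySem.Dict.mk [("performance", l1), ("availability", l2), ("connectivity", l3), ("configuration", l4)]).modify "performance" [] (· ++ [a]) =
    PySem.Dict.mk [("performance", l1 ++ [a]), ("availability", l2), ("connectivity", l3), ("configuration", l4)] := by
  simp [PySem.Dict.modify, PySem.Dict.insert, PySem.Dict.contains, PySem.Dict.getD, PySem.Dict.get?]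
lemma pvModifyA (l1 l2 l3 l4 : List String) (a : String) :
    (PySem.Dict.mk [("performance", l1), ("availability", l2), ("connectivity", l3), ("configuration", l4)]).modify "availability" [] (· ++ [a]) =
    PySem.Dict.mk [("performance", l1), ("availability", l2 ++ [a]), ("connectivity", l3), ("configuration", l4)] := by
  simp [PySem.Dict.modify, PySem.Dict.insert, PySem.Dict.contains, PySem.Dict.getD, PySem.Dict.get?]
lemma pvModifyC (l1 l2 l3 l4 : List String) (a : String) :
    (PySem.Dict.mk [("performance", l1), ("availability", l2), ("connectivity", l3), ("configuration", l4)]).modify "connectivity" [] (· ++ [a]) =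
    PySem.Dict.mk [("performance", l1), ("availability", l2), ("connectivity", l3 ++ [a]), ("configuration", l4)] := by
  simp [PySem.Dict.modify, PySem.Dict.insert, PySem.Dict.contains, PySem.Dict.getD, PySem.Dict.get?]
lemma pvModifyG (l1 l2 l3 l4 : List String) (a : String) :
    (PySem.Dict.mk [("performance", l1), ("availability", l2), ("connectivity", l3), ("configuration", l4)]).modify "configuration" [] (· ++ [a]) =
    PySem.Dict.mk [("performance", l1), ("availability", l2), ("connectivity", l3), ("configuration", l4 ++ [a])] := by
  simp [PySem.Dict.modify, PySem.Dict.insert, PySem.Dict.contains, PySem.Dict.getD, PySem.Dict.get?]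

-- Invariant of A's loop over the four-key dict.
lemma pvLoopA (alerts : List String) (l1 l2 l3 l4 : List String) :
    alerts.foldl (fun d alert =>
      if PySem.Str.isIn "CPU" alert || PySem.Str.isIn "MEMORY" alert || PySem.Str.isIn "TEMPERATURE" alert then
        d.modify "performance" [] (· ++ [alert])
      else if PySem.Str.isIn "DOWN" alert || PySem.Str.isIn "UNREACHABLE" alert then
        d.modify "availability" [] (· ++ [alert])
      else if PySem.Str.isIn "BGP" alert || PySem.Str.isIn "OSPF" alert || PySem.Str.isIn "ROUTE" alert then
        d.modify "connectivity" [] (· ++ [alert])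
      else
        d.modify "configuration" [] (· ++ [alert]))
      (PySem.Dict.mk [("performance", l1), ("availability", l2), ("connectivity", l3), ("configuration", l4)]) =
    PySem.Dict.mk
      [("performance", l1 ++ alerts.filter (fun a => pvClassify a == "performance")),
       ("availability", l2 ++ alerts.filter (fun a => pvClassify a == "availability")),
       ("connectivity", l3 ++ alerts.filter (fun a => pvClassify a == "connectivity")),
       ("configuration", l4 ++ alerts.filter (fun a => pvClassify a == "configuration"))] := by
  induction alerts generalizing l1 l2 l3 l4 with
  | nil => simp
  | cons x xs ih =>
    rcases Bool.eq_false_or_eq_true (PySem.Str.isIn "CPU" x || PySem.Str.isIn "MEMORY" x || PySem.Str.isIn "TEMPERATURE" x) with h1 | h1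
    · have hp1 : pvC1 x = true := h1
      have hc : pvClassify x = "performance" := by
        rw [pvClassify_eq, if_pos hp1]
      rw [List.foldl_cons, if_pos h1, pvModifyP, ih]
      simp [List.filter_cons, hc]
    · have hn1 : pvC1 x = false := h1
      rcases Bool.eq_false_or_eq_true (PySem.Str.isIn "DOWN" x || PySem.Str.isIn "UNREACHABLE" x) with h2 | h2
      · have hp2 : pvC2 x = true := h2
        have hc : pvClassify x = "availability" := by
          rw [pvClassify_eq, if_neg (by simp [hn1]), if_pos hp2]
        rw [List.foldl_cons, if_neg (by rw [h1]; exact Bool.false_ne_true), if_pos h2, pvModifyA, ih]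
        simp [List.filter_cons, hc]
      · have hn2 : pvC2 x = false := h2
        rcases Bool.eq_false_or_eq_true (PySem.Str.isIn "BGP" x || PySem.Str.isIn "OSPF" x || PySem.Str.isIn "ROUTE" x) with h3 | h3
        · have hp3 : pvC3 x = true := h3
          have hc : pvClassify x = "connectivity" := by
            rw [pvClassify_eq, if_neg (by simp [hn1]), if_neg (by simp [hn2]), if_pos hp3]
          rw [List.foldl_cons, if_neg (by rw [h1]; exact Bool.false_ne_true),
            if_neg (by rw [h2]; exact Bool.false_ne_true), if_pos h3, pvModifyC, ih]
          simp [List.filter_cons, hc]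
        · have hn3 : pvC3 x = false := h3
          have hc : pvClassify x = "configuration" := by
            rw [pvClassify_eq, if_neg (by simp [hn1]), if_neg (by simp [hn2]), if_neg (by simp [hn3])]
          rw [List.foldl_cons, if_neg (by rw [h1]; exact Bool.false_ne_true),
            if_neg (by rw [h2]; exact Bool.false_ne_true),
            if_neg (by rw [h3]; exact Bool.false_ne_true), pvModifyG, ih]
          simp [List.filter_cons, hc]

-- ===== VERDICT (by name: the statement is the Claim_ definition above) =====
theorem categorize_alerts_py_spec : Claim_equal_categorize_alerts_py := by
  intro alerts _
  unfold Spec_categorize_alerts_py categorize_alerts_py categorize_alerts_py_alt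
  simp only []
  rw [pvLoopA]
  cases h1 : (alerts.filter (fun a => pvClassify a == "performance")).isEmpty <;>
    cases h2 : (alerts.filter (fun a => pvClassify a == "availability")).isEmpty <;>
    cases h3 : (alerts.filter (fun a => pvClassify a == "connectivity")).isEmpty <;>
    cases h4 : (alerts.filter (fun a => pvClassify a == "configuration")).isEmpty <;>
    (have g1 := h1; have g2 := h2; have g3 := h3; have g4 := h4
     simp only [List.isEmpty_iff, List.isEmpty_eq_false_iff, ne_eq, List.filter_eq_nil_iff,
       beq_iff_eq] at g1 g2 g3 g4
     simp [pvRules, PySem.Dict.items, List.filter, List.foldl, h1, h2, h3, h4, g1, g2, g3, g4]) <;>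
    simp_all
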